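-- pv_equiv track=rewrite | github.com/Wesson1337/LeetCodeAndOther | leetcode/python/1768. Merge Strings Alternately.py | mergeAlternately
-- ===== SOURCE A (Python) =====
-- def mergeAlternately(word1: str, word2: str) -> str:
--     res = ""
--     if len(word1) > len(word2):
--         for i in range(len(word2)):
--             res += word1[i]
--             res += word2[i]
--         res += word1[len(word2):]
--     else:
--         for i in range(len(word1)):
--             res += word1[i]
--             res += word2[i]
--         res += word2[len(word1):]
--     return res
-- ===== SOURCE B (Python) =====
-- def mergeAlternately(word1: str, word2: str) -> str:
--     k = min(len(word1), len(word2))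
--     longer = word1 if len(word1) > len(word2) else word2
--
--     def ch(i):
--         if i < 2 * k:
--             return word2[i // 2] if i % 2 else word1[i // 2]
--         return longer[i - k]
--
--     return "".join(map(ch, range(len(word1) + len(word2))))
-- ===== Notes on version B (the rewrite author's own statement) =====
-- stated objective: alternative
-- what changed: Replaces A's interleave-then-append-remainder construction by a closed-form positional index mapping: each output position i of the full result of length len1+len2 is computed arithmetically (word1[i//2] / word2[i//2] in the alternating zone, longer[i-k] beyond it), with no interleaving loop and no tail slice-append.
import Mathlib
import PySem

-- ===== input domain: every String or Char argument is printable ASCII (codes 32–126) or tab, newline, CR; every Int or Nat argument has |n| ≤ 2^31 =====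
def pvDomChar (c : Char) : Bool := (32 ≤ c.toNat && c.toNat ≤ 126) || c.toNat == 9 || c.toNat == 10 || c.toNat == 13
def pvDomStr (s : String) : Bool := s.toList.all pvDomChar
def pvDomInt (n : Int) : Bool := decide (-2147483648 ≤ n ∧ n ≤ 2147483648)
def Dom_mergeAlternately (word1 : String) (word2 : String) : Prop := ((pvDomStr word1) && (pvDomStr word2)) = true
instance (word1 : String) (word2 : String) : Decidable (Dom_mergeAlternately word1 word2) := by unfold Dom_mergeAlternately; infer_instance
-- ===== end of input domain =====

-- B replaces A's interleave-loop-then-append-remainder construction by a closed-form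
-- positional index mapping over the whole output range (objective: alternative).

-- ===== PORT A =====
def mergeAlternately (word1 : String) (word2 : String) : String :=
  let res : List Char := []
  if PySem.Str.len word1 > PySem.Str.len word2 then
    -- for i in range(len(word2)): res += word1[i]; res += word2[i]
    let res := (PySem.List.pyRange 0 (PySem.Str.len word2) 1).foldl
      (fun r i => (r ++ [PySem.List.pyGetD word1.toList i ' ']) ++ [PySem.List.pyGetD word2.toList i ' ']) res
    -- res += word1[len(word2):]
    String.ofList (res ++ PySem.List.slice word1.toList (some (PySem.Str.len word2)) none)
  else
    let res := (PySem.List.pyRange 0 (PySem.Str.len word1) 1).foldl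
      (fun r i => (r ++ [PySem.List.pyGetD word1.toList i ' ']) ++ [PySem.List.pyGetD word2.toList i ' ']) res
    String.ofList (res ++ PySem.List.slice word2.toList (some (PySem.Str.len word1)) none)

-- ===== PORT B =====
-- ch(i): the character at output position i, by arithmetic on i (indices here are
-- always nonnegative and in range, so Nat indexing/`getD`/`/`/`%` are exact for Python).
def mergeAlternatelyCh (a b lng : List Char) (k : Nat) (i : Nat) : Char :=
  if i < 2 * k then
    (if i % 2 = 1 then b.getD (i / 2) ' ' else a.getD (i / 2) ' ')
  else lng.getD (i - k) ' '

def mergeAlternately_alt (word1 : String) (word2 : String) : String :=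
  let a := word1.toList
  let b := word2.toList
  -- k = min(len(word1), len(word2)); longer = word1 if len(word1) > len(word2) else word2
  let k := min a.length b.length
  let lng := if a.length > b.length then a else b
  -- "".join(map(ch, range(len(word1) + len(word2))))
  String.ofList ((List.range (a.length + b.length)).map (mergeAlternatelyCh a b lng k))

-- ===== PRECONDITION & SPEC =====
def Spec_mergeAlternately (word1 : String) (word2 : String) (out : String) : Prop := out = mergeAlternately_alt word1 word2
instance (word1 : String) (word2 : String) (out : String) : Decidable (Spec_mergeAlternately word1 word2 out) := by unfold Spec_mergeAlternately; infer_instance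

-- ===== CLAIM (what is proved, stated in full; the proofs are below) =====
def Claim_equal_mergeAlternately : Prop := ∀ (word1 : String) (word2 : String), Dom_mergeAlternately word1 word2 → Spec_mergeAlternately word1 word2 (mergeAlternately word1 word2)

-- ===== LEMMAS AND PROOFS =====

-- A's index loop over range(n), read as a flatMap of two-character chunks
theorem foldl_two_getD (a b : List Char) (n : Nat) :
    (PySem.List.pyRange 0 (n : Int) 1).foldl
      (fun r i => (r ++ [PySem.List.pyGetD a i ' ']) ++ [PySem.List.pyGetD b i ' ']) []
    = (List.range n).flatMap (fun k => [a.getD k ' ', b.getD k ' ']) := by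
  rw [PySem.List.pyRange_one]
  simp only [Int.sub_zero, Int.toNat_natCast, List.foldl_map, Int.zero_add,
    PySem.List.pyGetD_natCast, List.append_assoc, List.singleton_append]
  exact PySem.List.foldl_append_eq_flatMap _ _ []

-- B's mapping on the alternating zone [0, 2k) is the two-character flatMap
theorem map_range_two (a b lng : List Char) (k : Nat) :
    ∀ j, j ≤ k →
      (List.range (2 * j)).map (mergeAlternatelyCh a b lng k)
      = (List.range j).flatMap (fun t => [a.getD t ' ', b.getD t ' ']) := by
  intro j
  induction j with
  | zero => intro _; simp
  | succ j ih =>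
    intro hj
    have h2 : 2 * (j + 1) = (2 * j + 1) + 1 := by omega
    rw [h2, List.range_succ, List.range_succ, List.range_succ, List.flatMap_append,
      List.map_append, List.map_append, ih (by omega)]
    have e1 : mergeAlternatelyCh a b lng k (2 * j) = a.getD j ' ' := by
      unfold mergeAlternatelyCh
      have : ¬ (2 * j) % 2 = 1 := by omega
      rw [if_pos (by omega), if_neg this]
      congr 1; omega
    have e2 : mergeAlternatelyCh a b lng k (2 * j + 1) = b.getD j ' ' := by
      unfold mergeAlternatelyCh
      rw [if_pos (by omega), if_pos (by omega)]
      congr 1; omega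
    simp [e1, e2]

-- mapping getD over range' s m with s + m = length reproduces drop s
theorem map_range'_getD (l : List Char) (s m : Nat) (h : s + m = l.length) :
    (List.range' s m).map (fun i => l.getD i ' ') = l.drop s := by
  apply List.ext_getElem
  · simp; omega
  · intro i h1 h2
    simp only [List.getElem_map, List.getElem_range', List.getElem_drop]
    rw [List.getD_eq_getElem l ' ' (by simp at h1; omega)]
    congr 1; omega

-- B's mapping on the tail zone [2k, la+lb) is the drop of the longer word
theorem map_tail (a b lng : List Char) (k m : Nat) (hm : k + m = lng.length) :
    ((List.range m).map (2 * k + ·)).map (mergeAlternatelyCh a b lng k)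
    = lng.drop k := by
  rw [List.map_map]
  have : (mergeAlternatelyCh a b lng k ∘ (2 * k + ·))
      = (fun t => lng.getD (k + t) ' ') := by
    funext t
    simp only [Function.comp]
    unfold mergeAlternatelyCh
    rw [if_neg (by omega)]
    congr 1; omega
  rw [this]
  have := map_range'_getD lng k m hm
  rw [List.range'_eq_map_range, List.map_map] at this
  simpa [Function.comp] using this
  
-- B's whole list equals flatMap over the min ++ drop of the longer word
theorem alt_list_eq (a b : List Char) :
    (List.range (a.length + b.length)).map
      (mergeAlternatelyCh a b (if a.length > b.length then a else b) (min a.length b.length))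
    = (List.range (min a.length b.length)).flatMap (fun t => [a.getD t ' ', b.getD t ' '])
      ++ (if a.length > b.length then a else b).drop (min a.length b.length) := by
  set k := min a.length b.length with hk
  set lng := if a.length > b.length then a else b with hlng
  have hlen : lng.length = max a.length b.length := by
    rw [hlng]; split_ifs with h <;> omega
  have hsplit : a.length + b.length = 2 * k + (lng.length - k) := by
    rw [hlen]; omega
  rw [hsplit, List.range_add, List.map_append,
    map_range_two a b lng k k (le_refl k),
    map_tail a b lng k (lng.length - k) (by omega)]

-- ===== VERDICT (by name: the statement is the Claim_ definition above) =====
theorem mergeAlternately_spec : Claim_equal_mergeAlternately := by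
  intro word1 word2 _
  unfold Spec_mergeAlternately mergeAlternately mergeAlternately_alt
  simp only [PySem.Str.len_eq]
  rw [alt_list_eq]
  by_cases h : word2.toList.length < word1.toList.length
  · have hI : (word1.toList.length : Int) > (word2.toList.length : Int) := by exact_mod_cast h
    rw [if_pos hI, if_pos h]
    have hmin : min word1.toList.length word2.toList.length = word2.toList.length :=
      Nat.min_eq_right (Nat.le_of_lt h)
    rw [foldl_two_getD, hmin, PySem.List.slice_from _ (Int.natCast_nonneg _)]
    simp
  · have hI : ¬ (word1.toList.length : Int) > (word2.toList.length : Int) := by exact_mod_cast h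
    rw [if_neg hI, if_neg h]
    have hle : word1.toList.length ≤ word2.toList.length := not_lt.mp h
    have hmin : min word1.toList.length word2.toList.length = word1.toList.length :=
      Nat.min_eq_left hle
    rw [foldl_two_getD, hmin, PySem.List.slice_from _ (Int.natCast_nonneg _)]
    simp
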